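-- pv_equiv track=rewrite | github.com/gary7102/TRM_MAPF | src/praw/stats_wait_collision.py | _first_reach_times
-- ===== SOURCE A (Python) =====
-- from typing import Dict, List, Optional, Tuple
--
-- XY = Tuple[int, int]  # (x, y)
--
-- def _first_reach_times(paths: List[List[XY]], goals: List[XY]) -> List[int]:
--     """Return first timestep each agent reaches its goal; if never, return +inf (large)."""
--     T = len(paths)
--     N = len(paths[0]) if T > 0 else 0
--     inf = 10**9
--     reach = [inf] * N
--     for i in range(N):
--         gi = goals[i]
--         for t in range(T):
--             if paths[t][i] == gi:
--                 reach[i] = t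
--                 break
--     return reach
-- ===== SOURCE B (Python) =====
-- def _first_reach_times(paths, goals):
--     """Return first timestep each agent reaches its goal; if never, return +inf (large)."""
--     T = len(paths)
--     N = len(paths[0]) if T > 0 else 0
--     inf = 10**9
--     reach = [inf] * N
--     pending = set(range(N))
--     for t in range(T):
--         if not pending:
--             break
--         for i in sorted(pending):
--             if paths[t][i] == goals[i]:
--                 reach[i] = t
--                 pending.discard(i)
--     return reach
-- ===== Notes on version B (the rewrite author's own statement) =====
-- stated objective: alternative
-- what changed: B is a single time-major forward sweep that maintains a pending set of still-unreached agents and exits the time loop early once all agents have reached, instead of A's N independent per-agent scans over all timesteps.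
-- outside the precondition, e.g. on _first_reach_times([[(0, 0)], []], [(0, 0)]): A returns [0], B returns [0]
import Mathlib
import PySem

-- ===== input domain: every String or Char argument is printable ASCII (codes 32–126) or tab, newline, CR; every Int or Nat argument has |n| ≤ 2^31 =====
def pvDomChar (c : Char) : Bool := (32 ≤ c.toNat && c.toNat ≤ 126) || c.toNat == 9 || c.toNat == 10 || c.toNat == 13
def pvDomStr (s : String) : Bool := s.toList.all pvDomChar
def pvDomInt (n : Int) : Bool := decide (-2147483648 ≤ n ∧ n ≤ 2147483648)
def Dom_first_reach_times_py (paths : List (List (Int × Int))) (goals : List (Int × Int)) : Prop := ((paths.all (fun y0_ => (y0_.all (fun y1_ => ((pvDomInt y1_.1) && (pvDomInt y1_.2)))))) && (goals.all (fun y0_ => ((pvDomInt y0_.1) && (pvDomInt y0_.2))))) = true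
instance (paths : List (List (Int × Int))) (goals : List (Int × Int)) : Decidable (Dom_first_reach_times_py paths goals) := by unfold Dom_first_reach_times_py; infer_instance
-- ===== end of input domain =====

-- B replaces A's N independent per-agent time scans by one time-major forward sweep over a
-- pending-agent set with early exit; same results, same worst-case cost (objective: alternative).


-- ===== PORT A =====
-- inner 'for t in range(T): if paths[t][i] == gi: reach[i] = t; break' (indices are in range on Pre_)
def pvFindA (paths : List (List (Int × Int))) (gi : Int × Int) (i : Nat) : List Nat → Int
  | [] => 1000000000
  | t :: ts => if (paths.getD t []).getD i (0, 0) = gi then (t : Int) else pvFindA paths gi i ts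

def first_reach_times_py (paths : List (List (Int × Int))) (goals : List (Int × Int)) : List Int :=
  let N : Nat := if 0 < paths.length then (paths.headI).length else 0
  (List.range N).map (fun i => pvFindA paths (goals.getD i (0, 0)) i (List.range paths.length))

-- ===== PORT B =====
-- 'paths[t][i] == goals[i]' (indices are in range on Pre_)
def pvMatch (paths : List (List (Int × Int))) (goals : List (Int × Int)) (t i : Nat) : Bool :=
  decide ((paths.getD t []).getD i (0, 0) = goals.getD i (0, 0))

-- one timestep: scan a snapshot of the pending set, record reach[i] = t and drop matched agents
def pvStep (paths : List (List (Int × Int))) (goals : List (Int × Int)) (t : Nat)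
    (st : List Int × List Nat) : List Int × List Nat :=
  st.2.foldl
    (fun s i => if pvMatch paths goals t i then (s.1.set i (t : Int), s.2.filter (fun x => x ≠ i)) else s)
    st

-- 'for t in range(T): if not pending: break; …'
def pvSweep (paths : List (List (Int × Int))) (goals : List (Int × Int)) :
    List Nat → List Int × List Nat → List Int
  | [], st => st.1
  | t :: ts, st => if st.2.isEmpty then st.1 else pvSweep paths goals ts (pvStep paths goals t st)

def first_reach_times_py_alt (paths : List (List (Int × Int))) (goals : List (Int × Int)) : List Int :=
  let N : Nat := if 0 < paths.length then (paths.headI).length else 0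
  pvSweep paths goals (List.range paths.length) (List.replicate N 1000000000, List.range N)

-- ===== PRECONDITION & SPEC =====
-- Pre_ asks for N goals and rectangular paths (every row has at least N = len(paths[0]) entries):
-- outside this A raises IndexError, except on ragged inputs whose short rows lie beyond every
-- agent's reach time, where A happens to return (B returns the same value there) — a shape
-- narrowing stated here and cited in claim.json.
def Pre_first_reach_times_py (paths : List (List (Int × Int))) (goals : List (Int × Int)) : Prop :=
  paths.headI.length ≤ goals.length ∧ ∀ row ∈ paths, paths.headI.length ≤ row.length
instance (paths : List (List (Int × Int))) (goals : List (Int × Int)) : Decidable (Pre_first_reach_times_py paths goals) := by unfold Pre_first_reach_times_py; infer_instance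

def pvWitness_first_reach_times_py : (List (List (Int × Int))) × (List (Int × Int)) :=
  ([[(0, 0), (1, 1)], [(1, 0), (0, 1)]], [(1, 0), (1, 1)])

def Spec_first_reach_times_py (paths : List (List (Int × Int))) (goals : List (Int × Int)) (out : List Int) : Prop := out = first_reach_times_py_alt paths goals
instance (paths : List (List (Int × Int))) (goals : List (Int × Int)) (out : List Int) : Decidable (Spec_first_reach_times_py paths goals out) := by unfold Spec_first_reach_times_py; infer_instance

-- ===== CLAIM (what is proved, stated in full; the proofs are below) =====
def Claim_equal_first_reach_times_py : Prop := ∀ (paths : List (List (Int × Int))) (goals : List (Int × Int)), Dom_first_reach_times_py paths goals → Pre_first_reach_times_py paths goals → Spec_first_reach_times_py paths goals (first_reach_times_py paths goals)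

-- ===== LEMMAS AND PROOFS =====

-- "first t in ts matching agent j, else dflt" — the common value both ports compute per agent
def pvFirst (paths : List (List (Int × Int))) (goals : List (Int × Int)) (j : Nat) :
    List Nat → Int → Int
  | [], dflt => dflt
  | t :: ts, dflt => if pvMatch paths goals t j then (t : Int) else pvFirst paths goals j ts dflt

theorem pvFindA_eq_pvFirst (paths : List (List (Int × Int))) (goals : List (Int × Int))
    (j : Nat) (ts : List Nat) :
    pvFindA paths (goals.getD j (0, 0)) j ts = pvFirst paths goals j ts 1000000000 := by
  induction ts with
  | nil => rfl
  | cons t ts ih =>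
      simp only [pvFindA, pvFirst, pvMatch, decide_eq_true_eq]
      split_ifs with h
      · rfl
      · exact ih

theorem pvStep_fst_length (paths : List (List (Int × Int))) (goals : List (Int × Int))
    (t : Nat) (l : List Nat) (r : List Int) (p : List Nat) :
    (l.foldl (fun s i => if pvMatch paths goals t i then (s.1.set i (t : Int), s.2.filter (fun x => x ≠ i)) else s) (r, p)).1.length = r.length := by
  induction l generalizing r p with
  | nil => rfl
  | cons i l ih =>
      simp only [List.foldl_cons]
      by_cases h : pvMatch paths goals t i = true
      · rw [if_pos h, ih]; exact List.length_set
      · rw [if_neg h]; exact ih r p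

theorem pvStep_fst_getD (paths : List (List (Int × Int))) (goals : List (Int × Int))
    (t : Nat) (l : List Nat) (r : List Int) (p : List Nat) (j : Nat) :
    (l.foldl (fun s i => if pvMatch paths goals t i then (s.1.set i (t : Int), s.2.filter (fun x => x ≠ i)) else s) (r, p)).1.getD j 0 =
      if j ∈ l ∧ pvMatch paths goals t j = true ∧ j < r.length then (t : Int) else r.getD j 0 := by
  induction l generalizing r p with
  | nil => simp
  | cons i l ih =>
      simp only [List.foldl_cons]
      by_cases h : pvMatch paths goals t i = true
      · rw [if_pos h, ih]
        by_cases hj : j = i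
        · subst hj
          by_cases hlt : j < r.length
          · simp only [List.length_set]
            by_cases hl : j ∈ l
            · simp [hl, h, hlt, List.mem_cons]
            · simp only [hl, if_false, List.mem_cons, true_or, h, hlt, and_true,
                if_true, List.getD_eq_getElem?_getD, List.getElem?_set]
              simp
          · simp only [List.length_set]
            simp only [hlt, and_false, if_false, List.getD_eq_getElem?_getD, List.getElem?_set]
            simp [hlt]
        · simp only [List.length_set]
          have : ((r.set i (t : Int)).getD j 0) = r.getD j 0 := by
            simp [List.getD_eq_getElem?_getD, (Ne.symm hj : i ≠ j)]
          rw [this]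
          simp [List.mem_cons, hj]
      · rw [if_neg h, ih]
        by_cases hj : j = i
        · subst hj; simp [List.mem_cons, h]
        · simp [List.mem_cons, hj]

theorem pvStep_snd_mem (paths : List (List (Int × Int))) (goals : List (Int × Int))
    (t : Nat) (l : List Nat) (r : List Int) (p : List Nat) (j : Nat) :
    (j ∈ (l.foldl (fun s i => if pvMatch paths goals t i then (s.1.set i (t : Int), s.2.filter (fun x => x ≠ i)) else s) (r, p)).2) ↔
      (j ∈ p ∧ ¬ (j ∈ l ∧ pvMatch paths goals t j = true)) := by
  induction l generalizing r p with
  | nil => simp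
  | cons i l ih =>
      simp only [List.foldl_cons]
      by_cases h : pvMatch paths goals t i = true
      · rw [if_pos h, ih]
        simp only [List.mem_filter, List.mem_cons]
        by_cases hj : j = i
        · subst hj; simp [h]
        · simp [hj]
      · rw [if_neg h, ih]
        simp only [List.mem_cons]
        by_cases hj : j = i
        · subst hj; simp [h]
        · simp [hj]

theorem pvSweep_length (paths : List (List (Int × Int))) (goals : List (Int × Int))
    (ts : List Nat) (st : List Int × List Nat) :
    (pvSweep paths goals ts st).length = st.1.length := by
  induction ts generalizing st with
  | nil => rfl
  | cons t ts ih =>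
      simp only [pvSweep]
      by_cases h : st.2.isEmpty
      · simp [h]
      · rw [if_neg h, ih]
        exact pvStep_fst_length paths goals t st.2 st.1 st.2

theorem pvSweep_getD (paths : List (List (Int × Int))) (goals : List (Int × Int))
    (ts : List Nat) (r : List Int) (p : List Nat) (j : Nat) :
    (pvSweep paths goals ts (r, p)).getD j 0 =
      if j ∈ p ∧ j < r.length then pvFirst paths goals j ts (r.getD j 0) else r.getD j 0 := by
  induction ts generalizing r p with
  | nil =>
      simp only [pvSweep, pvFirst]
      split_ifs <;> rfl
  | cons t ts ih =>
      simp only [pvSweep]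
      by_cases he : p.isEmpty = true
      · rw [if_pos he]
        have : p = [] := List.isEmpty_iff.mp he
        subst this; simp
      · rw [if_neg he]
        rw [show pvStep paths goals t (r, p) = ((pvStep paths goals t (r, p)).1, (pvStep paths goals t (r, p)).2) from rfl]
        rw [ih]
        have hlen := pvStep_fst_length paths goals t p r p
        have hmem := pvStep_snd_mem paths goals t p r p j
        have hget := pvStep_fst_getD paths goals t p r p j
        simp only [pvStep] at hlen hmem hget ⊢
        rw [hlen]
        by_cases hp : j ∈ p
        · by_cases hlt : j < r.length
          · by_cases hm : pvMatch paths goals t j = true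
            · have : ¬ (j ∈ (List.foldl (fun s i => if pvMatch paths goals t i then (s.1.set i (t : Int), s.2.filter (fun x => x ≠ i)) else s) (r, p) p).2) := by
                rw [hmem]; simp [hp, hm]
              rw [if_neg (fun hc => this hc.1)]
              rw [hget, if_pos ⟨hp, hm, hlt⟩]
              simp [pvFirst, hp, hlt, hm]
            · have : (j ∈ (List.foldl (fun s i => if pvMatch paths goals t i then (s.1.set i (t : Int), s.2.filter (fun x => x ≠ i)) else s) (r, p) p).2) := by
                rw [hmem]; simp [hp, hm]
              rw [if_pos ⟨this, hlt⟩]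
              rw [hget, if_neg (by simp [hm])]
              simp [pvFirst, hp, hlt, hm]
          · rw [if_neg (by simp [hlt])]
            rw [hget, if_neg (by simp [hlt])]
            rw [if_neg (by simp [hlt])]
        · have : ¬ (j ∈ (List.foldl (fun s i => if pvMatch paths goals t i then (s.1.set i (t : Int), s.2.filter (fun x => x ≠ i)) else s) (r, p) p).2) := by
            rw [hmem]; simp [hp]
          rw [if_neg (fun hc => this hc.1)]
          rw [hget, if_neg (by simp [hp])]
          rw [if_neg (by simp [hp])]

-- ===== VERDICT (by name: the statement is the Claim_ definition above) =====
theorem first_reach_times_py_spec : Claim_equal_first_reach_times_py := by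
  intro paths goals _ _
  unfold Spec_first_reach_times_py first_reach_times_py first_reach_times_py_alt
  set N : Nat := if 0 < paths.length then (paths.headI).length else 0 with hN
  have hlenB : (pvSweep paths goals (List.range paths.length) (List.replicate N 1000000000, List.range N)).length = N := by
    rw [pvSweep_length]; simp
  apply List.ext_getElem
  · simp [hlenB]
  · intro j h1 h2
    simp only [List.getElem_map, List.getElem_range]
    have hjN : j < N := by simpa using h1
    rw [← List.getD_eq_getElem _ 0 h2]
    rw [pvSweep_getD]
    rw [if_pos ⟨List.mem_range.mpr hjN, by simpa using hjN⟩]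
    rw [List.getD_replicate _ hjN]
    exact pvFindA_eq_pvFirst paths goals j (List.range paths.length)
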